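-- pv_equiv track=rewrite | github.com/btezzxxt/lintcode-python | 867 4 keys keyboard.py | maxA
-- ===== SOURCE A (Python) =====
-- def maxA(N):
--     # write your code here
--     dp = [0] * (N + 1)
--     dp[1] = 1
--     dp[2] = 2
--     for i in range(3, N + 1):
--         # select all & copy
--         dp[i] = i
--         steps_left = i - 2
--         # at least we need one A to print, so we could copy from 0 to steps_left -1 times
--         for copy_times in range(0, steps_left):
--             dp[i] = max(dp[i - 2 - copy_times] + dp[i - 2 - copy_times] * copy_times, dp[i])
--     return dp[N]
-- ===== SOURCE B (Python) =====
-- def maxA(N):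
--     # Rolling window DP: an optimal last copy-paste block never reaches further
--     # back than 6 keystrokes, so only the last 6 dp values are kept and only a
--     # constant number of copy distances is tried per step.  O(N) time, O(1) space.
--     if N < 3:
--         return N
--     last = [0, 1, 2]                      # dp[i-3], dp[i-2], dp[i-1]
--     for i in range(3, N + 1):
--         best = i
--         for c in range(min(5, i - 2)):
--             best = max(best, last[-(2 + c)] * (c + 1))
--         last.append(best)
--         if len(last) > 6:
--             last.pop(0)
--     return last[-1]
-- ===== Notes on version B (the rewrite author's own statement) =====
-- stated objective: faster
-- what changed: Replaces A's full dp array with an O(N) inner scan per index by a rolling buffer of the last 6 dp values and an inner loop over at most 5 copy distances (any longer copy distance is dominated by one 3 shorter), turning O(N^2) time / O(N) space into O(N) time / O(1) space.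
import Mathlib
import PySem

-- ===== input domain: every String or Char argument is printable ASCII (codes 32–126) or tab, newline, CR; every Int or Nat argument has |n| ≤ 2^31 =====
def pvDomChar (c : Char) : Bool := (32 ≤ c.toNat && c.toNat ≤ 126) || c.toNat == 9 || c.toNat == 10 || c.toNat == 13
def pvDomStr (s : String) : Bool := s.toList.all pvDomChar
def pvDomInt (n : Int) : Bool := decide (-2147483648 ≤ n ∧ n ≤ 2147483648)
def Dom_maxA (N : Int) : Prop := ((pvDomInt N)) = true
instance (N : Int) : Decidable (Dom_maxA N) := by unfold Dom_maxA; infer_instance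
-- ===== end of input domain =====

-- B replaces A's O(N^2) full-array DP by an O(N) rolling window of the last 6 dp
-- values with at most 5 copy distances tried per step (objective: faster).

-- ===== PORT A =====
def maxA (N : Int) : Int :=
  let dp : List Int := List.replicate (N + 1).toNat 0
  let dp := PySem.List.pySetD dp 1 1
  let dp := PySem.List.pySetD dp 2 2
  let dp := (PySem.List.pyRange 3 (N + 1) 1).foldl (fun dp i =>
    let dp := PySem.List.pySetD dp i i
    let stepsLeft := i - 2
    (PySem.List.pyRange 0 stepsLeft 1).foldl (fun dp c =>
      PySem.List.pySetD dp i
        (max (PySem.List.pyGetD dp (i - 2 - c) 0 + PySem.List.pyGetD dp (i - 2 - c) 0 * c)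
             (PySem.List.pyGetD dp i 0))) dp) dp
  PySem.List.pyGetD dp N 0

-- ===== PORT B =====
def maxA_alt (N : Int) : Int :=
  if N < 3 then N
  else
    let last : List Int := [0, 1, 2]
    let last := (PySem.List.pyRange 3 (N + 1) 1).foldl (fun last i =>
      let best : Int := i
      let best := (PySem.List.pyRange 0 (min 5 (i - 2)) 1).foldl (fun best c =>
        max best (PySem.List.pyGetD last (-(2 + c)) 0 * (c + 1))) best
      let last := last ++ [best]
      if PySem.List.len last > 6 then last.tail else last) last
    PySem.List.pyGetD last (-1) 0

-- ===== PRECONDITION & SPEC =====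
-- Pre_ excludes exactly N < 2, where the Python A raises IndexError (dp[1]/dp[2] on a too-short list).
def Pre_maxA (N : Int) : Prop := 2 ≤ N
instance (N : Int) : Decidable (Pre_maxA N) := by unfold Pre_maxA; infer_instance
def pvWitness_maxA : Int := 7

def Spec_maxA (N : Int) (out : Int) : Prop := out = maxA_alt N
instance (N : Int) (out : Int) : Decidable (Spec_maxA N out) := by unfold Spec_maxA; infer_instance

-- ===== CLAIM (what is proved, stated in full; the proofs are below) =====
def Claim_equal_maxA : Prop := ∀ (N : Int), Dom_maxA N → Pre_maxA N → Spec_maxA N (maxA N)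

-- ===== LEMMAS AND PROOFS =====

-- Reference recurrence: hist n = [f n, f (n-1), …, f 0] where f is A's dp value.
def hist : Nat → List Int
  | 0 => [0]
  | 1 => [1, 0]
  | 2 => [2, 1, 0]
  | n + 3 =>
      ((List.range (n + 1)).foldl
        (fun a c => max a ((hist (n + 2)).getD (1 + c) 0 * ((c : Int) + 1))) ((n : Int) + 3))
      :: hist (n + 2)

def f (n : Nat) : Int := (hist n).headD 0

theorem hist_succ (n : Nat) : hist (n + 1) = f (n + 1) :: hist n := by
  match n with
  | 0 => rfl
  | 1 => rfl
  | n + 2 => rfl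

theorem hist_getD (n k : Nat) (hk : k ≤ n) : (hist n).getD k 0 = f (n - k) := by
  induction n generalizing k with
  | zero =>
      have : k = 0 := by omega
      subst this; rfl
  | succ n ih =>
      rw [hist_succ]
      cases k with
      | zero => rfl
      | succ k => simpa using ih k (by omega)

theorem f_succ3 (n : Nat) :
    f (n + 3) = (List.range (n + 1)).foldl
      (fun a c => max a (f (n + 1 - c) * ((c : Int) + 1))) ((n : Int) + 3) := by
  show (((List.range (n + 1)).foldl
      (fun a c => max a ((hist (n + 2)).getD (1 + c) 0 * ((c : Int) + 1))) ((n : Int) + 3)) :: hist (n + 2)).headD 0 = _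
  simp only [List.headD_cons]
  apply PySem.List.foldl_congr_mem
  intro a c hc
  rw [hist_getD (n + 2) (1 + c) (by simp at hc; omega)]
  congr 3
  omega

theorem foldl_max_le_int (l : List Nat) (t : Nat → Int) (init b : Int)
    (h0 : init ≤ b) (h : ∀ c ∈ l, t c ≤ b) :
    l.foldl (fun a c => max a (t c)) init ≤ b := by
  induction l generalizing init with
  | nil => exact h0
  | cons x xs ih =>
      simp only [List.foldl_cons]
      exact ih _ (max_le h0 (h x (by simp))) (fun c hc => h c (by simp [hc]))

theorem f_nonneg (n : Nat) : 0 ≤ f n := by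
  match n with
  | 0 => decide
  | 1 => decide
  | 2 => decide
  | n + 3 =>
      rw [f_succ3]
      exact le_trans (by positivity) (PySem.List.le_foldl_max_int _ _ _).1

theorem f_growth (n : Nat) : 2 * f n ≤ f (n + 3) := by
  match n with
  | 0 => decide
  | m + 1 =>
      rw [f_succ3 (m + 1)]
      have h1 : (1 : Nat) ∈ List.range (m + 1 + 1) := List.mem_range.mpr (by omega)
      have := (PySem.List.le_foldl_max_int (List.range (m + 1 + 1))
        (fun c => f (m + 1 + 1 - c) * ((c : Int) + 1)) (((m + 1 : Nat) : Int) + 3)).2 1 h1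
      simp only [Nat.cast_one] at this
      have h3 : m + 1 + 1 - 1 = m + 1 := by omega
      rw [h3] at this
      linarith

-- the window: restricting the copy distance to < 5 loses nothing
theorem f_window (n : Nat) :
    f (n + 3) = (List.range (min 5 (n + 1))).foldl
      (fun a c => max a (f (n + 1 - c) * ((c : Int) + 1))) ((n : Int) + 3) := by
  rw [f_succ3]
  set T : Nat -> Int := fun c => f (n + 1 - c) * ((c : Int) + 1) with hT
  set W := (List.range (min 5 (n + 1))).foldl (fun a c => max a (T c)) ((n : Int) + 3) with hW
  have key : ∀ c, c < n + 1 → T c ≤ W := by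
    intro c
    induction c using Nat.strong_induction_on with
    | _ c ih =>
      intro hc
      by_cases h5 : c < 5
      · exact (PySem.List.le_foldl_max_int _ _ _).2 c (List.mem_range.mpr (by omega))
      · have hdom : T c ≤ T (c - 3) := by
          have hidx : n + 1 - (c - 3) = (n + 1 - c) + 3 := by omega
          have hg := f_growth (n + 1 - c)
          have hnn := f_nonneg (n + 1 - c)
          simp only [hT, hidx]
          have hcast : ((c - 3 : Nat) : Int) = (c : Int) - 3 := by
            push_cast [Nat.cast_sub (by omega : 3 ≤ c)]; ring
          rw [hcast]
          have hc5 : (5 : Int) ≤ (c : Int) := by exact_mod_cast Nat.le_of_not_lt h5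
          nlinarith [hg, hnn]
        exact le_trans hdom (ih (c - 3) (by omega) (by omega))
  apply le_antisymm
  · exact foldl_max_le_int _ _ _ _ (PySem.List.le_foldl_max_int _ _ _).1
      (fun c hc => key c (List.mem_range.mp hc))
  · exact foldl_max_le_int _ _ _ _ (PySem.List.le_foldl_max_int _ _ _).1
      (fun c hc => (PySem.List.le_foldl_max_int _ _ _).2 c
        (List.mem_range.mpr (by have := List.mem_range.mp hc; omega)))

-- ---- bridging port A to f ----
def model (N : Int) (j : Nat) : List Int :=
  (List.range (N + 1).toNat).map (fun k => if k ≤ j then f k else 0)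

theorem model_length (N : Int) (j : Nat) : (model N j).length = (N + 1).toNat := by
  simp [model]

theorem model_getElem (N : Int) (j k : Nat) (hk : k < (N + 1).toNat) :
    (model N j)[k]'(by simp [model]; omega) = if k ≤ j then f k else 0 := by
  simp [model]

theorem model_init (N : Int) (_hN : 2 ≤ N) :
    PySem.List.pySetD (PySem.List.pySetD (List.replicate (N + 1).toNat (0 : Int)) 1 1) 2 2
      = model N 2 := by
  rw [PySem.List.pySetD_of_nonneg _ _ (by norm_num), PySem.List.pySetD_of_nonneg _ _ (by norm_num)]
  apply List.ext_getElem
  · simp [model_length]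
  · intro k h1 h2
    rw [model_getElem N 2 k (by simpa [model_length] using h2)]
    have hk : k < (N + 1).toNat := by simpa [model_length] using h2
    rw [List.getElem_set, List.getElem_set]
    simp only [List.getElem_replicate]
    have h0 : f 0 = 0 := by decide
    have hf1 : f 1 = 1 := by decide
    have hf2 : f 2 = 2 := by decide
    rcases Nat.lt_or_ge k 3 with hk3 | hk3
    · interval_cases k <;> simp [h0, hf1, hf2]
    · split_ifs <;> omega

theorem innerA (N i : Int) (_hN : 2 ≤ N) (h3 : 3 ≤ i) (_hiN : i ≤ N)
    (cs : List Int) (hcs : ∀ c ∈ cs, 0 ≤ c ∧ c ≤ i - 3) (acc : Int) :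
    cs.foldl (fun dp c =>
        PySem.List.pySetD dp i
          (max (PySem.List.pyGetD dp (i - 2 - c) 0 + PySem.List.pyGetD dp (i - 2 - c) 0 * c)
               (PySem.List.pyGetD dp i 0)))
      ((model N (i.toNat - 1)).set i.toNat acc)
    = (model N (i.toNat - 1)).set i.toNat
        (cs.foldl (fun a c =>
          max (f (i - 2 - c).toNat + f (i - 2 - c).toNat * c) a) acc) := by
  induction cs generalizing acc with
  | nil => rfl
  | cons c cs ih =>
      simp only [List.foldl_cons]
      have hc := hcs c (by simp)
      have hlen : ((model N (i.toNat - 1)).set i.toNat acc).length = (N + 1).toNat := by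
        simp [model_length]
      have hm : (i - 2 - c).toNat < (N + 1).toNat := by omega
      have hget1 : PySem.List.pyGetD ((model N (i.toNat - 1)).set i.toNat acc) (i - 2 - c) 0
          = f (i - 2 - c).toNat := by
        rw [PySem.List.pyGetD_eq_getElem _ _ (by omega) (by rw [hlen]; omega)]
        rw [List.getElem_set_ne (by omega)]
        rw [model_getElem N _ _ hm]
        simp only [if_pos (by omega : (i - 2 - c).toNat ≤ i.toNat - 1)]
      have hget2 : PySem.List.pyGetD ((model N (i.toNat - 1)).set i.toNat acc) i 0 = acc := by
        rw [PySem.List.pyGetD_eq_getElem _ _ (by omega) (by rw [hlen]; omega)]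
        rw [List.getElem_set_self (by simp only [List.length_set]; rw [model_length]; omega)]
      rw [hget1, hget2, PySem.List.pySetD_of_nonneg _ _ (by omega), List.set_set]
      exact ih (fun x hx => hcs x (by simp [hx])) _

theorem innerA_value (N i : Int) (hN : 2 ≤ N) (h3 : 3 ≤ i) (hiN : i ≤ N) :
    (PySem.List.pyRange 0 (i - 2) 1).foldl (fun a c =>
        max (f (i - 2 - c).toNat + f (i - 2 - c).toNat * c) a) i
      = f i.toNat := by
  obtain ⟨n, hn⟩ : ∃ n : Nat, i.toNat = n + 3 := ⟨i.toNat - 3, by omega⟩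
  rw [PySem.List.pyRange_one, List.foldl_map]
  rw [(by omega : i - 2 - 0 = i - 2), (by omega : (i - 2).toNat = n + 1)]
  have hcongr : ∀ (a : Int) (k : Nat), k ∈ List.range (n + 1) →
      max (f (i - 2 - (0 + (k : Int))).toNat + f (i - 2 - (0 + (k : Int))).toNat * (0 + (k : Int))) a
        = max a (f (n + 1 - k) * ((k : Int) + 1)) := by
    intro a k hk
    have hk' : k < n + 1 := List.mem_range.mp hk
    have hidx : (i - 2 - (0 + (k : Int))).toNat = n + 1 - k := by omega
    rw [hidx, max_comm]
    ring_nf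
  rw [PySem.List.foldl_congr_mem _ _ _ _ hcongr, hn, f_succ3 n]
  congr 1
  omega

theorem outerA (N : Int) (hN : 2 ≤ N) : ∀ (m : Nat) (i : Int), 3 ≤ i → i ≤ N + 1 →
    m = (N + 1 - i).toNat →
    (PySem.List.pyRange i (N + 1) 1).foldl (fun dp i =>
        (PySem.List.pyRange 0 (i - 2) 1).foldl (fun dp c =>
          PySem.List.pySetD dp i
            (max (PySem.List.pyGetD dp (i - 2 - c) 0 + PySem.List.pyGetD dp (i - 2 - c) 0 * c)
                 (PySem.List.pyGetD dp i 0))) (PySem.List.pySetD dp i i))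
      (model N (i.toNat - 1))
    = model N N.toNat := by
  intro m
  induction m with
  | zero =>
      intro i h3 hi hm
      rw [PySem.List.pyRange_one_eq_nil (by omega)]
      simp only [List.foldl_nil]
      congr 1
      omega
  | succ m ih =>
      intro i h3 hi hm
      rw [PySem.List.pyRange_one_cons (by omega)]
      simp only [List.foldl_cons]
      have hstep :
          (PySem.List.pyRange 0 (i - 2) 1).foldl (fun dp c =>
            PySem.List.pySetD dp i
              (max (PySem.List.pyGetD dp (i - 2 - c) 0 + PySem.List.pyGetD dp (i - 2 - c) 0 * c)
                   (PySem.List.pyGetD dp i 0)))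
            (PySem.List.pySetD (model N (i.toNat - 1)) i i)
          = model N i.toNat := by
        rw [PySem.List.pySetD_of_nonneg _ _ (by omega)]
        rw [innerA N i hN h3 (by omega) _
          (fun c hc => by
            have := PySem.List.mem_pyRange_one.mp hc
            omega) i]
        rw [innerA_value N i hN h3 (by omega)]
        apply List.ext_getElem
        · simp [model_length]
        · intro k h1 h2
          have hk : k < (N + 1).toNat := by simpa [model_length] using h2
          rw [model_getElem N _ _ hk]
          rcases eq_or_ne k i.toNat with hki | hki
          · subst hki
            rw [List.getElem_set_self (by simp only [List.length_set]; rw [model_length]; omega)]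
            simp
          · rw [List.getElem_set_ne (by omega)]
            rw [model_getElem N _ _ hk]
            have hiff : k ≤ i.toNat - 1 ↔ k ≤ i.toNat := by omega
            simp only [hiff]
      rw [hstep]
      have : model N i.toNat = model N ((i + 1).toNat - 1) := by congr 1; omega
      rw [this]
      exact ih (i + 1) (by omega) (by omega) (by omega)

theorem maxA_eq_f (N : Int) (h : 2 ≤ N) : maxA N = f N.toNat := by
  have houter := outerA N h (N + 1 - 3).toNat 3 (by omega) (by omega) rfl
  simp only [maxA]
  rw [model_init N h, (show model N 2 = model N ((3:Int).toNat - 1) by congr 1), houter]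
  rw [PySem.List.pyGetD_eq_getElem _ _ (by omega) (by rw [model_length]; omega)]
  rw [model_getElem N _ _ (by omega)]
  rw [if_pos (le_refl _)]

-- ---- bridging port B to f ----
def win (j : Nat) : List Int :=
  (List.range (min (j + 1) 6)).map (fun k => f (j + 1 - min (j + 1) 6 + k))

theorem win_length (j : Nat) : (win j).length = min (j + 1) 6 := by
  simp [win]

theorem win_two : win 2 = [0, 1, 2] := by decide

theorem win_getElem (j k : Nat) (hk : k < min (j + 1) 6) :
    (win j)[k]'(by rw [win_length]; omega) = f (j + 1 - min (j + 1) 6 + k) := by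
  simp [win]

theorem innerB_value (i : Int) (h3 : 3 ≤ i) :
    (PySem.List.pyRange 0 (min 5 (i - 2)) 1).foldl (fun best c =>
        max best (PySem.List.pyGetD (win (i.toNat - 1)) (-(2 + c)) 0 * (c + 1))) i
      = f i.toNat := by
  obtain ⟨n, hn⟩ : ∃ n : Nat, i.toNat = n + 3 := ⟨i.toNat - 3, by omega⟩
  rw [PySem.List.pyRange_one, List.foldl_map]
  rw [(show (min 5 (i - 2) - 0).toNat = min 5 (n + 1) by omega)]
  have hcongr : ∀ (a : Int) (k : Nat), k ∈ List.range (min 5 (n + 1)) →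
      max a (PySem.List.pyGetD (win (i.toNat - 1)) (-(2 + (0 + (k : Int)))) 0 * ((0 + (k : Int)) + 1))
        = max a (f (n + 1 - k) * ((k : Int) + 1)) := by
    intro a k hk
    have hk' : k < min 5 (n + 1) := List.mem_range.mp hk
    have hL : (win (i.toNat - 1)).length = min (i.toNat - 1 + 1) 6 := win_length _
    have hidx : (-(2 + (0 + (k : Int)))) = -(((2 + k : Nat) : Int)) := by push_cast; ring
    rw [hidx, PySem.List.pyGetD_neg_natCast _ _ _ (by omega) (by rw [hL]; omega)]
    simp only [win, List.length_map, List.length_range, List.getElem_map, List.getElem_range]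
    rw [(show i.toNat - 1 + 1 - min (i.toNat - 1 + 1) 6 + (min (i.toNat - 1 + 1) 6 - (2 + k))
        = n + 1 - k by omega)]
    rw [(show (0 : Int) + (k : Int) + 1 = (k : Int) + 1 by ring)]
  rw [PySem.List.foldl_congr_mem _ _ _ _ hcongr, hn, f_window n]
  congr 1
  omega

theorem win_step (j : Nat) (hj : 2 ≤ j) :
    (if PySem.List.len (win j ++ [f (j + 1)]) > 6 then (win j ++ [f (j + 1)]).tail
     else win j ++ [f (j + 1)]) = win (j + 1) := by
  have hlen : PySem.List.len (win j ++ [f (j + 1)]) = ((min (j + 1) 6 : Nat) : Int) + 1 := by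
    simp [win_length]
  rcases Nat.lt_or_ge j 5 with hj5 | hj5
  · rw [if_neg (by rw [hlen]; omega)]
    apply List.ext_getElem
    · simp [win_length]; omega
    · intro k h1 h2
      have hk : k < j + 2 := by simp [win_length] at h2; omega
      rw [win_getElem (j + 1) k (by omega)]
      rcases Nat.lt_or_ge k (j + 1) with hk1 | hk1
      · rw [List.getElem_append_left (by rw [win_length]; omega)]
        rw [win_getElem j k (by omega)]
        congr 1
        omega
      · have hkj : k = j + 1 := by omega
        subst hkj
        rw [List.getElem_append_right (by rw [win_length]; omega)]
        simp [win_length]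
        congr 1
        omega
  · rw [if_pos (by rw [hlen]; omega)]
    apply List.ext_getElem
    · simp [win_length]; omega
    · intro k h1 h2
      have hk : k < 6 := by simp [win_length] at h2; omega
      rw [List.getElem_tail, win_getElem (j + 1) k (by omega)]
      rcases Nat.lt_or_ge (k + 1) 6 with hk1 | hk1
      · rw [List.getElem_append_left (by rw [win_length]; omega)]
        rw [win_getElem j (k + 1) (by omega)]
        congr 1
        omega
      · have hkj : k = 5 := by omega
        subst hkj
        rw [List.getElem_append_right (by rw [win_length]; omega)]
        simp [win_length]
        congr 1
        omega

theorem outerB (N : Int) (hN : 3 ≤ N) : ∀ (m : Nat) (i : Int), 3 ≤ i → i ≤ N + 1 →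
    m = (N + 1 - i).toNat →
    (PySem.List.pyRange i (N + 1) 1).foldl (fun last i =>
        if PySem.List.len (last ++ [(PySem.List.pyRange 0 (min 5 (i - 2)) 1).foldl (fun best c =>
              max best (PySem.List.pyGetD last (-(2 + c)) 0 * (c + 1))) i]) > 6
        then (last ++ [(PySem.List.pyRange 0 (min 5 (i - 2)) 1).foldl (fun best c =>
              max best (PySem.List.pyGetD last (-(2 + c)) 0 * (c + 1))) i]).tail
        else last ++ [(PySem.List.pyRange 0 (min 5 (i - 2)) 1).foldl (fun best c =>
              max best (PySem.List.pyGetD last (-(2 + c)) 0 * (c + 1))) i])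
      (win (i.toNat - 1))
    = win N.toNat := by
  intro m
  induction m with
  | zero =>
      intro i h3 hi hm
      rw [PySem.List.pyRange_one_eq_nil (by omega)]
      simp only [List.foldl_nil]
      congr 1
      omega
  | succ m ih =>
      intro i h3 hi hm
      rw [PySem.List.pyRange_one_cons (by omega)]
      simp only [List.foldl_cons]
      rw [innerB_value i h3]
      have hji : i.toNat - 1 + 1 = i.toNat := by omega
      have hstep := win_step (i.toNat - 1) (by omega)
      rw [hji] at hstep
      rw [hstep]
      have : win i.toNat = win ((i + 1).toNat - 1) := by congr 1; omega
      rw [this]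
      exact ih (i + 1) (by omega) (by omega) (by omega)

theorem maxA_alt_eq_f (N : Int) (h : 2 ≤ N) : maxA_alt N = f N.toNat := by
  rcases eq_or_lt_of_le h with hN2 | hN3
  · rw [← hN2]; decide
  · have houter := outerB N (by omega) (N + 1 - 3).toNat 3 (by omega) (by omega) rfl
    simp only [maxA_alt, if_neg (show ¬ N < 3 by omega)]
    rw [(show ([0, 1, 2] : List Int) = win ((3:Int).toNat - 1) by
      rw [(show (3:Int).toNat - 1 = 2 by decide), win_two]), houter]
    have hne : win N.toNat ≠ [] := by
      intro hnil
      have := win_length N.toNat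
      rw [hnil] at this
      simp at this
      omega
    rw [PySem.List.pyGetD_neg_one _ _ hne]
    rw [List.getLast_eq_getElem]
    rw [win_getElem N.toNat _ (by have hw := win_length N.toNat; omega)]
    congr 1
    have := win_length N.toNat
    omega

-- ===== VERDICT (by name: the statement is the Claim_ definition above) =====
theorem maxA_spec : Claim_equal_maxA := by
  intro N _ hP
  unfold Spec_maxA
  rw [maxA_eq_f N hP, maxA_alt_eq_f N hP]
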